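-- pv_equiv track=rewrite | github.com/NOAA-CO-OPS/CO-OPS-Tidal-Analysis-Datum-Calculator | tadc/tides.py | EXHL
-- ===== SOURCE A (Python) =====
-- def EXHL(hvals, lvals):
--     #This function chooses and flags highs and lows for semidiurnal/mixed tide types
--     htypes = []
--     for i in range(len(hvals)):
--         htypes.append('H')
--     for i in range(0, len(hvals)-1,2):
--         if (hvals[i] >= hvals[i+1]):
--             htypes[i] = 'HH'
--         else:
--             htypes[i+1] = 'HH'
--
--     ltypes = []
--     for i in range(len(lvals)):
--         ltypes.append('L')
--     for i in range(0, len(lvals)-1,2):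
--         if (lvals[i] <= lvals[i+1]):
--             ltypes[i] = 'LL'
--         else:
--             ltypes[i+1] = 'LL'
--
--     return htypes, ltypes
-- ===== SOURCE B (Python) =====
-- def EXHL(hvals, lvals):
--     # One shared single-pass helper: emit each pair's labels directly,
--     # keeping a pending first-of-pair element instead of filling then overwriting.
--     def label(vals, dominates, dom_lab, sub_lab):
--         out = []
--         pending = None
--         for v in vals:
--             if pending is None:
--                 pending = v
--             else:
--                 out += [dom_lab, sub_lab] if dominates(pending, v) else [sub_lab, dom_lab]
--                 pending = None
--         if pending is not None:
--             out.append(sub_lab)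
--         return out
--     return (label(hvals, lambda a, b: a >= b, 'HH', 'H'),
--             label(lvals, lambda a, b: a <= b, 'LL', 'L'))
-- ===== Notes on version B (the rewrite author's own statement) =====
-- stated objective: simpler
-- what changed: Replaces the duplicated fill-then-overwrite index-stepped loops with one shared single-pass state-machine helper that emits each pair's labels directly (pending first-of-pair element), called once for highs and once for lows.
import Mathlib
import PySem

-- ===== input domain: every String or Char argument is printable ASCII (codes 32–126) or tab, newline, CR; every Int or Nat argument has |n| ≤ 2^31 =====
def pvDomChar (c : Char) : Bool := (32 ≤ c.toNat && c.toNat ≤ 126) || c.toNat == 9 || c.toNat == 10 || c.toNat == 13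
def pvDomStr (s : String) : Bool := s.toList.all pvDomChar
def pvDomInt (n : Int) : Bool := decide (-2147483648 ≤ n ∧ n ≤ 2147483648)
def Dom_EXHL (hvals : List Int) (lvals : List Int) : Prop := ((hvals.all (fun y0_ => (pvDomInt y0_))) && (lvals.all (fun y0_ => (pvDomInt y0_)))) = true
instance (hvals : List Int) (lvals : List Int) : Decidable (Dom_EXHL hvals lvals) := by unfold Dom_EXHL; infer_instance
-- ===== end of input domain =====

-- B replaces A's duplicated fill-then-overwrite loops by one shared single-pass
-- pair-emitting helper (objective: simpler); return values proved equal on all inputs.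

-- ===== PORT A =====
-- indexing hvals[i]/hvals[i+1] and assignment htypes[i]=… use loop indices of
-- range(0, len-1, 2), which are nonnegative and in range, so pyGetD/List.set at
-- i.toNat are exact here.
def EXHL (hvals : List Int) (lvals : List Int) : List String × List String :=
  let htypes := (PySem.List.pyRange 0 hvals.length 1).foldl (fun acc _ => acc ++ ["H"]) []
  let htypes := (PySem.List.pyRange 0 ((hvals.length : Int) - 1) 2).foldl
    (fun ht i =>
      if PySem.List.pyGetD hvals i 0 ≥ PySem.List.pyGetD hvals (i + 1) 0 then
        ht.set i.toNat "HH"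
      else
        ht.set (i.toNat + 1) "HH") htypes
  let ltypes := (PySem.List.pyRange 0 lvals.length 1).foldl (fun acc _ => acc ++ ["L"]) []
  let ltypes := (PySem.List.pyRange 0 ((lvals.length : Int) - 1) 2).foldl
    (fun lt i =>
      if PySem.List.pyGetD lvals i 0 ≤ PySem.List.pyGetD lvals (i + 1) 0 then
        lt.set i.toNat "LL"
      else
        lt.set (i.toNat + 1) "LL") ltypes
  (htypes, ltypes)

-- ===== PORT B =====
-- state machine: `pending` holds the first element of an unfinished pair
def pvStep (dominates : Int → Int → Prop) [DecidableRel dominates] (domLab subLab : String)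
    (st : List String × Option Int) (v : Int) : List String × Option Int :=
  match st.2 with
  | none => (st.1, some v)
  | some a => (st.1 ++ (if dominates a v then [domLab, subLab] else [subLab, domLab]), none)

def pvLabel (dominates : Int → Int → Prop) [DecidableRel dominates] (domLab subLab : String)
    (vals : List Int) : List String :=
  let st := vals.foldl (pvStep dominates domLab subLab) ([], none)
  match st.2 with
  | none => st.1
  | some _ => st.1 ++ [subLab]

def EXHL_alt (hvals : List Int) (lvals : List Int) : List String × List String :=
  (pvLabel (fun a b => a ≥ b) "HH" "H" hvals, pvLabel (fun a b => a ≤ b) "LL" "L" lvals)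

-- ===== PRECONDITION & SPEC =====
def Spec_EXHL (hvals : List Int) (lvals : List Int) (out : List String × List String) : Prop := out = EXHL_alt hvals lvals
instance (hvals : List Int) (lvals : List Int) (out : List String × List String) : Decidable (Spec_EXHL hvals lvals out) := by unfold Spec_EXHL; infer_instance

-- ===== CLAIM (what is proved, stated in full; the proofs are below) =====
def Claim_equal_EXHL : Prop := ∀ (hvals : List Int) (lvals : List Int), Dom_EXHL hvals lvals → Spec_EXHL hvals lvals (EXHL hvals lvals)

-- ===== LEMMAS AND PROOFS =====

-- A's per-list computation, generic over the comparison and labels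
def pvAStep (dominates : Int → Int → Prop) [DecidableRel dominates] (domLab : String)
    (vals : List Int) (ht : List String) (i : Int) : List String :=
  if dominates (PySem.List.pyGetD vals i 0) (PySem.List.pyGetD vals (i + 1) 0) then
    ht.set i.toNat domLab
  else
    ht.set (i.toNat + 1) domLab

def pvASide (dominates : Int → Int → Prop) [DecidableRel dominates] (domLab subLab : String)
    (vals : List Int) : List String :=
  (PySem.List.pyRange 0 ((vals.length : Int) - 1) 2).foldl (pvAStep dominates domLab vals)
    ((PySem.List.pyRange 0 vals.length 1).foldl (fun acc _ => acc ++ [subLab]) [])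

theorem pvEXHL_eq_sides (hvals lvals : List Int) :
    EXHL hvals lvals =
      (pvASide (fun a b => a ≥ b) "HH" "H" hvals, pvASide (fun a b => a ≤ b) "LL" "L" lvals) := rfl

theorem pvFill_eq {α : Type} (s : String) :
    ∀ (l : List α) (acc : List String),
      l.foldl (fun a _ => a ++ [s]) acc = acc ++ List.replicate l.length s := by
  intro l
  induction l with
  | nil => simp
  | cons x t ih => intro acc; simp [List.foldl_cons, ih, List.replicate_succ]

theorem pvFill_range (s : String) (vals : List Int) :
    (PySem.List.pyRange 0 vals.length 1).foldl (fun acc _ => acc ++ [s]) [] =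
      List.replicate vals.length s := by
  rw [pvFill_eq, PySem.List.pyRange_one]
  simp

theorem pvRange2_cons (m : Int) (hm : 1 ≤ m) :
    PySem.List.pyRange 0 m 2 = 0 :: (PySem.List.pyRange 0 (m - 2) 2).map (· + 2) := by
  rw [PySem.List.pyRange_of_pos _ _ (by norm_num : (0:Int) < 2),
      PySem.List.pyRange_of_pos _ _ (by norm_num : (0:Int) < 2)]
  by_cases h3 : 2 < m
  · rw [if_pos (by omega), if_pos (by omega)]
    have hc : (m - 0 + 2 - 1) / 2 = (m - 2 - 0 + 2 - 1) / 2 + 1 := by omega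
    have hc' : ((m - 0 + 2 - 1) / 2).toNat = ((m - 2 - 0 + 2 - 1) / 2).toNat + 1 := by omega
    rw [hc', List.range_succ_eq_map]
    simp [List.map_map, Function.comp]
    intro k _
    ring
  · rw [if_pos (by omega), if_neg (by omega)]
    have : ((m - 0 + 2 - 1) / 2).toNat = 1 := by omega
    rw [this]
    simp

theorem pvRange2_nonneg {m x : Int} (hx : x ∈ PySem.List.pyRange 0 m 2) : 0 ≤ x := by
  have := (PySem.List.mem_pyRange_iff_of_pos (by norm_num : (0:Int) < 2) x).mp hx
  omega

theorem pvShift (dominates : Int → Int → Prop) [DecidableRel dominates] (domLab : String)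
    (a b : Int) (rest : List Int) :
    ∀ (is_ : List Int), (∀ i ∈ is_, 0 ≤ i) → ∀ (c1 c2 : String) (t : List String),
      (is_.map (· + 2)).foldl (pvAStep dominates domLab (a :: b :: rest)) (c1 :: c2 :: t) =
        c1 :: c2 :: is_.foldl (pvAStep dominates domLab rest) t := by
  intro is_
  induction is_ with
  | nil => intro _ c1 c2 t; simp
  | cons i it ih =>
    intro hnn c1 c2 t
    have hi : 0 ≤ i := hnn i (by simp)
    have hget : ∀ j : Int, 0 ≤ j →
        PySem.List.pyGetD (a :: b :: rest) (j + 2) 0 = PySem.List.pyGetD rest j 0 := by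
      intro j hj
      rw [PySem.List.pyGetD_of_nonneg _ _ (by omega), PySem.List.pyGetD_of_nonneg _ _ hj]
      have : (j + 2).toNat = j.toNat + 2 := by omega
      rw [this]
      rfl
    have hstep : pvAStep dominates domLab (a :: b :: rest) (c1 :: c2 :: t) (i + 2) =
        c1 :: c2 :: pvAStep dominates domLab rest t i := by
      unfold pvAStep
      rw [hget i hi]
      have h1 : (i + 2) + 1 = (i + 1) + 2 := by ring
      rw [h1, hget (i + 1) (by omega)]
      have h2 : (i + 2).toNat = i.toNat + 2 := by omega
      split <;> simp [h2]
    simp only [List.map_cons, List.foldl_cons, hstep]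
    exact ih (fun x hx => hnn x (by simp [hx])) c1 c2 _

theorem pvBPrefix (dominates : Int → Int → Prop) [DecidableRel dominates] (domLab subLab : String) :
    ∀ (vals : List Int) (out : List String) (st : Option Int),
      vals.foldl (pvStep dominates domLab subLab) (out, st) =
        (out ++ (vals.foldl (pvStep dominates domLab subLab) ([], st)).1,
          (vals.foldl (pvStep dominates domLab subLab) ([], st)).2) := by
  intro vals
  induction vals with
  | nil => intro out st; simp
  | cons v t ih =>
    intro out st
    cases st with
    | none =>
      simp only [List.foldl_cons]
      have h1 : pvStep dominates domLab subLab (out, none) v = (out, some v) := rfl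
      have h2 : pvStep dominates domLab subLab ([], none) v = ([], some v) := rfl
      rw [h1, h2, ih out (some v)]
    | some a =>
      simp only [List.foldl_cons]
      have hC : ∀ o : List String, pvStep dominates domLab subLab (o, some a) v =
          (o ++ (if dominates a v then [domLab, subLab] else [subLab, domLab]), none) := by
        intro o; rfl
      rw [hC out, hC [],
        ih (out ++ (if dominates a v then [domLab, subLab] else [subLab, domLab])) none,
        ih ([] ++ (if dominates a v then [domLab, subLab] else [subLab, domLab])) none]
      simp [List.append_assoc]

theorem pvSide_eq (dominates : Int → Int → Prop) [DecidableRel dominates] (domLab subLab : String) :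
    ∀ (vals : List Int),
      pvASide dominates domLab subLab vals = pvLabel dominates domLab subLab vals
  | [] => by
    unfold pvASide pvLabel
    rw [pvFill_range]
    norm_num [PySem.List.pyRange, pvStep]
  | [a] => by
    unfold pvASide pvLabel
    rw [pvFill_range]
    norm_num [PySem.List.pyRange, pvStep]
  | a :: b :: rest => by
    have IH := pvSide_eq dominates domLab subLab rest
    unfold pvASide pvLabel
    rw [pvFill_range]
    have hm : (1 : Int) ≤ ((a :: b :: rest).length : Int) - 1 := by simp
    rw [pvRange2_cons _ hm]
    have hm2 : ((a :: b :: rest).length : Int) - 1 - 2 = ((rest.length : Int) - 1) := by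
      simp; omega
    rw [hm2, List.foldl_cons]
    have hfirst : pvAStep dominates domLab (a :: b :: rest)
        (List.replicate (a :: b :: rest).length subLab) 0 =
        (if dominates a b then [domLab, subLab] else [subLab, domLab]) ++
          List.replicate rest.length subLab := by
      unfold pvAStep
      have hga : PySem.List.pyGetD (a :: b :: rest) 0 0 = a := by
        rw [PySem.List.pyGetD_of_nonneg _ _ (by norm_num)]; rfl
      have hgb : PySem.List.pyGetD (a :: b :: rest) (0 + 1) 0 = b := by
        rw [PySem.List.pyGetD_of_nonneg _ _ (by norm_num)]; rfl
      rw [hga, hgb]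
      split <;> simp [List.replicate_succ]
    rw [hfirst]
    have hIH' : (PySem.List.pyRange 0 ((rest.length : Int) - 1) 2).foldl
        (pvAStep dominates domLab rest) (List.replicate rest.length subLab) =
        pvLabel dominates domLab subLab rest := by
      have h := IH
      unfold pvASide at h
      rw [pvFill_range] at h
      exact h
    have hB2 : (a :: b :: rest).foldl (pvStep dominates domLab subLab) ([], none) =
        rest.foldl (pvStep dominates domLab subLab)
          ((if dominates a b then [domLab, subLab] else [subLab, domLab]), none) := by
      simp only [List.foldl_cons]
      congr 1
    rw [hB2, pvBPrefix dominates domLab subLab rest _ none]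
    by_cases hd : dominates a b
    · simp only [if_pos hd, List.cons_append, List.nil_append]
      rw [pvShift dominates domLab a b rest _ (fun x hx => pvRange2_nonneg hx), hIH']
      cases hp : (rest.foldl (pvStep dominates domLab subLab) ([], none)).2 <;>
        simp [pvLabel, hp]
    · simp only [if_neg hd, List.cons_append, List.nil_append]
      rw [pvShift dominates domLab a b rest _ (fun x hx => pvRange2_nonneg hx), hIH']
      cases hp : (rest.foldl (pvStep dominates domLab subLab) ([], none)).2 <;>
        simp [pvLabel, hp]
termination_by vals => vals.length

-- ===== VERDICT (by name: the statement is the Claim_ definition above) =====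
theorem EXHL_spec : Claim_equal_EXHL := by
  intro hvals lvals _
  unfold Spec_EXHL
  rw [pvEXHL_eq_sides, EXHL_alt, pvSide_eq, pvSide_eq]
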